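-- pv_equiv track=rewrite | github.com/WalluR/Social-Media | NewCode.py | splitInterface
-- ===== SOURCE A (Python) =====
-- def splitInterface(data,split):
--     calc = 0
--     i = 0
--     while i < len(data):
--         calc += len(data[i])
--         if calc >= split:
--             return(i)
--         i += 1
-- ===== SOURCE B (Python) =====
-- def splitInterface(data, split):
--     prefix = []
--     total = 0
--     for s in data:
--         total += len(s)
--         prefix.append(total)
--     lo, hi = 0, len(prefix)
--     while lo < hi:
--         mid = (lo + hi) // 2
--         if prefix[mid] < split:
--             lo = mid + 1
--         else:
--             hi = mid
--     return lo if lo < len(prefix) else None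
-- ===== Notes on version B (the rewrite author's own statement) =====
-- stated objective: alternative
-- what changed: Replaces A's single accumulate-and-check scan with early return by building the full prefix-sum table of element lengths and then binary-searching (bisect_left) for the first prefix sum >= split, returning None when the search lands past the end.
import Mathlib
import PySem

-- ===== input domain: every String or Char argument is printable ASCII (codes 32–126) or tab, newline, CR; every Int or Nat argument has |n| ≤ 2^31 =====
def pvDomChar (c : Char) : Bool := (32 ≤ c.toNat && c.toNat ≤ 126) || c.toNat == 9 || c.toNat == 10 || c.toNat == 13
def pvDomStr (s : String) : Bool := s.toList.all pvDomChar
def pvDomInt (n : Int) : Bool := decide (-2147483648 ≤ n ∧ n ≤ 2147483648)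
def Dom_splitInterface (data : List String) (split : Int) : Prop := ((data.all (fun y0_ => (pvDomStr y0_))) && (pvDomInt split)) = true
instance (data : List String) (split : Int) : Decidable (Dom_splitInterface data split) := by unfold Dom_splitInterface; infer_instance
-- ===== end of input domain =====

-- B replaces A's accumulate-and-check scan by a prefix-sum table plus a binary search (bisect_left); alternative decomposition, not claimed faster.

-- ===== PORT A =====
-- A's while loop over indices, as structural recursion carrying the same state (calc, i).
def splitGo (split : Int) : List String → Int → Int → Option Int
  | [], _, _ => none
  | s :: rest, acc, i =>
    let c := acc + PySem.Str.len s
    if split ≤ c then some i else splitGo split rest c (i + 1)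

def splitInterface (data : List String) (split : Int) : Option Int :=
  splitGo split data 0 0

-- ===== PORT B =====
-- Source B's prefix-sum accumulation loop.
def pvPrefix : List String → Int → List Int
  | [], _ => []
  | s :: rest, total =>
    let t := total + PySem.Str.len s
    t :: pvPrefix rest t

-- Source B's hand-written bisect_left loop is exactly Python's bisect.bisect_left; ported as the prelude's PySem.List.bisectLeft.
def splitInterface_alt (data : List String) (split : Int) : Option Int :=
  let pre := pvPrefix data 0
  let j := PySem.List.bisectLeft pre split
  if j < pre.length then some (j : Int) else none

-- ===== PRECONDITION & SPEC =====
def Spec_splitInterface (data : List String) (split : Int) (out : Option Int) : Prop := out = splitInterface_alt data split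
instance (data : List String) (split : Int) (out : Option Int) : Decidable (Spec_splitInterface data split out) := by unfold Spec_splitInterface; infer_instance

-- ===== CLAIM (what is proved, stated in full; the proofs are below) =====
def Claim_equal_splitInterface : Prop := ∀ (data : List String) (split : Int), Dom_splitInterface data split → Spec_splitInterface data split (splitInterface data split)

-- ===== LEMMAS AND PROOFS =====

theorem str_len_nonneg (s : String) : 0 ≤ PySem.Str.len s := by
  simp [PySem.Str.len_eq]

-- A's scan returns the first index (offset by i) whose running prefix sum reaches split.
theorem splitGo_eq_findIdx? (split : Int) :
    ∀ (data : List String) (acc i : Int),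
      splitGo split data acc i
        = ((pvPrefix data acc).findIdx? (fun c => split ≤ c)).map (fun k => i + (k : Int)) := by
  intro data
  induction data with
  | nil => intro acc i; simp [splitGo, pvPrefix]
  | cons s rest ih =>
      intro acc i
      simp only [splitGo, pvPrefix, List.findIdx?_cons, decide_eq_true_eq]
      by_cases h : split ≤ acc + PySem.Str.len s
      · rw [if_pos h, if_pos h]; simp
      · rw [if_neg h, if_neg h, ih]
        cases (pvPrefix rest (acc + PySem.Str.len s)).findIdx? (fun c => decide (split ≤ c)) with
        | none => simp
        | some a => simp; omega

theorem mem_pvPrefix_le : ∀ (data : List String) (t m : Int), m ∈ pvPrefix data t → t ≤ m := by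
  intro data
  induction data with
  | nil => intro t m h; simp [pvPrefix] at h
  | cons s rest ih =>
      intro t m h
      simp only [pvPrefix, List.mem_cons] at h
      have h0 := str_len_nonneg s
      rcases h with h | h
      · omega
      · have := ih (t + PySem.Str.len s) m h; omega

theorem pvPrefix_sorted : ∀ (data : List String) (t : Int),
    List.Pairwise (fun a b => a ≤ b) (pvPrefix data t) := by
  intro data
  induction data with
  | nil => intro t; simp [pvPrefix]
  | cons s rest ih =>
      intro t
      simp only [pvPrefix]
      exact List.Pairwise.cons (fun m hm => mem_pvPrefix_le rest _ m hm) (ih _)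

-- findIdx? of a predicate that is false exactly below r and true at r (if r is in range).
theorem findIdx?_char (p : Int → Bool) :
    ∀ (a : List Int) (r : Nat), r ≤ a.length →
      (∀ j (hj : j < a.length), j < r → p a[j] = false) →
      (∀ h : r < a.length, p a[r] = true) →
      a.findIdx? p = if r < a.length then some r else none := by
  intro a
  induction a with
  | nil => intro r hr _ _; simp at hr; simp [hr]
  | cons y t ih =>
      intro r hr hlt hge
      cases r with
      | zero =>
          have hy : p y = true := by
            have := hge (by simp); simpa using this
          simp [List.findIdx?_cons, hy]
      | succ r' =>
          have hy : p y = false := by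
            have := hlt 0 (by simp) (by omega); simpa using this
          have ht : t.findIdx? p = if r' < t.length then some r' else none := by
            apply ih r' (by simpa using hr)
            · intro j hj hjr
              have := hlt (j + 1) (by simpa using Nat.succ_lt_succ hj) (by omega)
              simpa using this
            · intro h
              have := hge (by simpa using Nat.succ_lt_succ h)
              simpa using this
          rw [List.findIdx?_cons]
          simp only [hy, ht]
          by_cases h : r' < t.length <;> simp [h]

theorem findIdx?_eq_bisect (a : List Int) (x : Int)
    (hs : List.Pairwise (fun u v => u ≤ v) a) :
    a.findIdx? (fun c => x ≤ c)
      = if PySem.List.bisectLeft a x < a.length then some (PySem.List.bisectLeft a x) else none := by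
  obtain ⟨hle, hlt, hge⟩ := PySem.List.bisectLeft_spec a x hs
  apply findIdx?_char _ a _ hle
  · intro j hj hjr
    have := hlt j hj hjr
    simp; omega
  · intro h
    have := hge _ h (le_refl _)
    simpa using this

-- ===== VERDICT (by name: the statement is the Claim_ definition above) =====
theorem splitInterface_spec : Claim_equal_splitInterface := by
  intro data split _
  unfold Spec_splitInterface splitInterface splitInterface_alt
  rw [splitGo_eq_findIdx?, findIdx?_eq_bisect _ _ (pvPrefix_sorted data 0)]
  by_cases h : PySem.List.bisectLeft (pvPrefix data 0) split < (pvPrefix data 0).length <;>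
    simp [h]
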